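-- pv_equiv track=rewrite | github.com/Lilian-Moon11/medical-record-management-assistant | views/family_history.py | _group_by_relation
-- ===== SOURCE A (Python) =====
-- from collections import defaultdict
--
-- def _group_by_relation(items: list[dict]) -> dict[str, list[tuple[str, list[dict]]]]:
--     """
--     Returns {relation: [(name, [entries_for_person]), ...]}
--
--     People with the same (relation, name) are grouped as one person.
--     Unnamed entries within the same relation are each their own person slot
--     (name key = auto-index string so they stay separate).
--     """
--     # First pass — bucket by (relation, name)
--     buckets: dict[tuple[str, str], list[dict]] = defaultdict(list)
--     unnamed_idx: dict[str, int] = defaultdict(int)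
--
--     for it in items:
--         rel  = (it.get("relation") or "Other").strip()
--         name = (it.get("name") or "").strip()
--         if not name:
--             # Give each unnamed entry its own slot
--             idx  = unnamed_idx[rel]
--             unnamed_idx[rel] += 1
--             key  = (rel, f"__unnamed_{idx}")
--         else:
--             key = (rel, name)
--         buckets[key].append(it)
--
--     # Second pass — group into {relation: [(display_name, entries), ...]}
--     by_rel: dict[str, list[tuple[str, list[dict]]]] = defaultdict(list)
--     for (rel, name_key), entries in buckets.items():
--         display_name = "" if name_key.startswith("__unnamed_") else name_key
--         by_rel[rel].append((display_name, entries))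
--
--     return dict(by_rel)
-- ===== SOURCE B (Python) =====
-- def _group_by_relation(items: list[dict]) -> dict[str, list[tuple[str, list[dict]]]]:
--     """Dict-free grouping: annotate each item with its (relation, name_key),
--     numbering unnamed entries by counting earlier unnamed entries of the same
--     relation; then build the result by first-occurrence dedup plus filter scans
--     (no hash buckets). Quadratic, but short and purely declarative."""
--     pre = [((it.get("relation") or "Other").strip(),
--             (it.get("name") or "").strip(), it) for it in items]
--     ann = [(rel,
--             name if name else
--             "__unnamed_%d" % sum(1 for r2, n2, _ in pre[:i] if r2 == rel and not n2),
--             it)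
--            for i, (rel, name, it) in enumerate(pre)]
--     return {
--         rel: [("" if key.startswith("__unnamed_") else key,
--                [it for r2, k2, it in ann if (r2, k2) == (rel, key)])
--               for key in dict.fromkeys(k for r2, k, _ in ann if r2 == rel)]
--         for rel in dict.fromkeys(r for r, _, _ in ann)
--     }
-- ===== Notes on version B (the rewrite author's own statement) =====
-- stated objective: alternative
-- what changed: B abandons A's hash bucketing entirely: it annotates each item with its (relation, name_key) by counting earlier unnamed entries of the same relation in a prefix scan, then builds the result purely by first-occurrence dedup and filter scans over the annotated list (no defaultdicts, no mutation), trading A's expected O(n) for a shorter declarative O(n^2) formulation.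
import Mathlib
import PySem

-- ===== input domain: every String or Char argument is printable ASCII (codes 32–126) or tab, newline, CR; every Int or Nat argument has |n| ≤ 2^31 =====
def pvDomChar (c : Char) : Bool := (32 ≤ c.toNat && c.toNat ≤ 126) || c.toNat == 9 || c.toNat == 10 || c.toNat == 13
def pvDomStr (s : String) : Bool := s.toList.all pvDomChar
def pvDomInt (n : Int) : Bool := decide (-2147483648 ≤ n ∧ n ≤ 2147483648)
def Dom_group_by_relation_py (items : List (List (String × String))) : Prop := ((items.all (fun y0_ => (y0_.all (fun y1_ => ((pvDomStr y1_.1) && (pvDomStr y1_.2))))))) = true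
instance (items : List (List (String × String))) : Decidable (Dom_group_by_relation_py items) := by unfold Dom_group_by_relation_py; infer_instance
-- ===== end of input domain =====

-- B drops A's hash bucketing: it annotates each item with its (relation, name_key)
-- by counting earlier unnamed entries of the same relation in a prefix scan, then
-- groups by first-occurrence dedup plus filter scans (no dicts, no mutation);
-- return values are proved equal (B trades A's expected O(n) for a declarative O(n^2)).

-- shared field extraction (both Pythons start from the same two expressions):
-- it.get(k) on a dict given as an association list: first match
def pvGetField (it : List (String × String)) (k : String) : Option String :=
  (it.find? (fun p => p.1 == k)).map (·.2)

-- rel = (it.get("relation") or "Other").strip()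
def pvRel (it : List (String × String)) : String :=
  PySem.Str.strip (let v := (pvGetField it "relation").getD ""; if v = "" then "Other" else v)

-- name = (it.get("name") or "").strip()
def pvName (it : List (String × String)) : String :=
  PySem.Str.strip ((pvGetField it "name").getD "")

-- ===== PORT A =====
def group_by_relation_py (items : List (List (String × String))) : List (String × List (String × (List (List (String × String))))) :=
  -- first pass: buckets (defaultdict(list) keyed by (rel, name)), unnamed_idx (defaultdict(int))
  let st := items.foldl
    (fun (st : PySem.Dict (String × String) (List (List (String × String))) × PySem.Dict String Int) it =>
      let rel := pvRel it
      let name := pvName it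
      if name = "" then
        let idx := st.2.getD rel 0
        let u' := st.2.insert rel (idx + 1)
        let key := (rel, "__unnamed_" ++ PySem.Int.toStr idx)
        (st.1.modify key [] (· ++ [it]), u')
      else
        (st.1.modify (rel, name) [] (· ++ [it]), st.2))
    (PySem.Dict.empty, PySem.Dict.empty)
  let buckets := st.1
  -- second pass: by_rel = defaultdict(list); append (display_name, entries) under rel
  let by_rel := buckets.items.foldl
    (fun b p =>
      let display := if PySem.Str.startswith p.1.2 "__unnamed_" then "" else p.1.2
      b.modify p.1.1 [] (· ++ [(display, p.2)]))
    PySem.Dict.empty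
  by_rel.items

-- ===== PORT B =====
def group_by_relation_py_alt (items : List (List (String × String))) : List (String × List (String × (List (List (String × String))))) :=
  -- pre = [(rel, name, it) for it in items]
  let pre := items.map (fun it => (pvRel it, pvName it, it))
  -- ann: name or "__unnamed_<count of earlier unnamed entries of the same relation>"
  -- (sum(1 for … in pre[:i] if …) is ported as countP over the slice pre[:i]: a 0/1-sum)
  let ann := (PySem.List.enumerate pre).map (fun p =>
    (p.2.1,
     (if p.2.2.1 = "" then
        "__unnamed_" ++ PySem.Int.toStr
          (((PySem.List.slice pre none (some p.1)).countP
              (fun q => q.1 == p.2.1 && q.2.1 == "") : Nat) : Int)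
      else p.2.2.1),
     p.2.2.2))
  -- nested comprehension: dedup (dict.fromkeys) of relations / keys, filter scans for entries
  (PySem.List.dedup (ann.map (·.1))).map (fun rel =>
    (rel,
     (PySem.List.dedup ((ann.filter (fun q => q.1 == rel)).map (fun q => q.2.1))).map (fun key =>
       ((if PySem.Str.startswith key "__unnamed_" then "" else key),
        (ann.filter (fun q => q.1 == rel && q.2.1 == key)).map (fun q => q.2.2)))))

-- ===== PRECONDITION & SPEC =====
def Spec_group_by_relation_py (items : List (List (String × String))) (out : List (String × List (String × (List (List (String × String)))))) : Prop := out = group_by_relation_py_alt items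
-- instance search hits its size limit on this deeply nested product type, so the
-- DecidableEq term is composed by hand (it computes like the derived one would)
def pvDecPair {α β : Type} (da : DecidableEq α) (db : DecidableEq β) : DecidableEq (α × β) :=
  fun a b =>
    haveI := da; haveI := db
    decidable_of_iff (a.1 = b.1 ∧ a.2 = b.2) (Prod.ext_iff).symm
def pvDecList {α : Type} (da : DecidableEq α) : DecidableEq (List α) :=
  haveI := da; inferInstance
def pvOutDecEq : DecidableEq (List (String × List (String × (List (List (String × String)))))) :=
  pvDecList (pvDecPair inferInstance (pvDecList (pvDecPair inferInstance inferInstance)))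
instance (items : List (List (String × String))) (out : List (String × List (String × (List (List (String × String)))))) : Decidable (Spec_group_by_relation_py items out) := by unfold Spec_group_by_relation_py; exact pvOutDecEq out (group_by_relation_py_alt items)

-- ===== CLAIM (what is proved, stated in full; the proofs are below) =====
def Claim_equal_group_by_relation_py : Prop := ∀ (items : List (List (String × String))), Dom_group_by_relation_py items → Spec_group_by_relation_py items (group_by_relation_py items)

-- ===== LEMMAS AND PROOFS =====

-- the common annotation stream of A: ((rel, name_key), item) pairs, threading the
-- unnamed counter dict
def pvAnnot (u : PySem.Dict String Int) : List (List (String × String)) → List ((String × String) × List (String × String))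
  | [] => []
  | it :: rest =>
    let rel := pvRel it
    let name := pvName it
    if name = "" then
      ((rel, "__unnamed_" ++ PySem.Int.toStr (u.getD rel 0)), it) :: pvAnnot (u.insert rel (u.getD rel 0 + 1)) rest
    else
      ((rel, name), it) :: pvAnnot u rest

-- the same stream computed from pre-extracted triples and a base-count function
def pvAnnP (f : String → Int) : List (String × String × List (String × String)) → List ((String × String) × List (String × String))
  | [] => []
  | (rel, name, it) :: rest =>
    if name = "" then
      ((rel, "__unnamed_" ++ PySem.Int.toStr (f rel)), it) ::
        pvAnnP (fun r => if r = rel then f rel + 1 else f r) rest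
    else
      ((rel, name), it) :: pvAnnP f rest

def pvTri (p : (String × String) × List (String × String)) : String × String × List (String × String) :=
  (p.1.1, p.1.2, p.2)

def pvUn (rel : String) (q : String × String × List (String × String)) : Bool :=
  q.1 == rel && q.2.1 == ""

def pvFlat (ann : List ((String × String) × List (String × String))) : PySem.Dict (String × String) (List (List (String × String))) :=
  ann.foldl (fun F p => F.modify p.1 [] (· ++ [p.2])) PySem.Dict.empty

theorem pv_annot_eq_annP : ∀ (l : List (List (String × String))) (u : PySem.Dict String Int),
    pvAnnot u l = pvAnnP (fun r => u.getD r 0) (l.map (fun it => (pvRel it, pvName it, it))) := by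
  intro l
  induction l with
  | nil => intro u; rfl
  | cons it rest ih =>
    intro u
    by_cases h : pvName it = ""
    · have hf : (fun r => (u.insert (pvRel it) (u.getD (pvRel it) 0 + 1)).getD r 0)
          = (fun r => if r = pvRel it then u.getD (pvRel it) 0 + 1 else u.getD r 0) := by
        funext r
        rw [PySem.Dict.getD_insert]
      simp only [pvAnnot, List.map_cons, pvAnnP, h, if_true]
      rw [ih, hf]
    · simp only [pvAnnot, List.map_cons, pvAnnP, h, if_false]
      rw [ih]

theorem pv_enum_eq_annP : ∀ (rest done : List (String × String × List (String × String))),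
    (PySem.List.enumerate rest (done.length : Int)).map (fun p =>
      (p.2.1,
       (if p.2.2.1 = "" then
          "__unnamed_" ++ PySem.Int.toStr
            ((((PySem.List.slice (done ++ rest) none (some p.1)).countP
                (fun q => q.1 == p.2.1 && q.2.1 == "")) : Nat) : Int)
        else p.2.2.1),
       p.2.2.2))
    = (pvAnnP (fun r => (done.countP (pvUn r) : Int)) rest).map pvTri := by
  intro rest
  induction rest with
  | nil => intro done; simp [PySem.List.enumerate_nil, pvAnnP]
  | cons x rest ih =>
    intro done
    obtain ⟨rel, name, it⟩ := x
    rw [PySem.List.enumerate_cons, List.map_cons]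
    have hslice : PySem.List.slice (done ++ (rel, name, it) :: rest) none (some (done.length : Int))
        = done := by
      rw [PySem.List.slice_to_natCast]
      exact List.take_left
    have htail := ih (done ++ [(rel, name, it)])
    have hlen : ((done ++ [(rel, name, it)]).length : Int) = (done.length : Int) + 1 := by simp
    have happ : (done ++ [(rel, name, it)]) ++ rest = done ++ (rel, name, it) :: rest := by simp
    rw [hlen, happ] at htail
    have hcount : ∀ r : String, ((done ++ [(rel, name, it)]).countP (pvUn r) : Int)
        = (if name = "" then (if r = rel then (done.countP (pvUn r) : Int) + 1 else (done.countP (pvUn r) : Int))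
           else (done.countP (pvUn r) : Int)) := by
      intro r
      rw [List.countP_append, List.countP_cons, List.countP_nil]
      by_cases h : name = ""
      · subst h
        by_cases hr : r = rel
        · subst hr; simp [pvUn]
        · have hfalse : pvUn r (rel, "", it) = false := by
            simp only [pvUn, Bool.and_eq_false_iff]
            left
            exact beq_eq_false_iff_ne.2 (fun hc => hr hc.symm)
          simp [hr, hfalse]
      · have hfalse : pvUn r (rel, name, it) = false := by
          simp only [pvUn, Bool.and_eq_false_iff]
          right
          exact beq_eq_false_iff_ne.2 h
        simp [h, hfalse]
    by_cases h : name = ""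
    · have hff : (fun r => ((done ++ [(rel, name, it)]).countP (pvUn r) : Int))
          = (fun r => if r = rel then (done.countP (pvUn rel) : Int) + 1 else (done.countP (pvUn r) : Int)) := by
        funext r
        rw [hcount r, if_pos h]
        by_cases hr : r = rel <;> simp [hr]
      rw [hff] at htail
      subst h
      simp only [pvAnnP, reduceIte, List.map_cons]
      refine congrArg₂ List.cons ?_ htail
      rw [hslice]
      rfl
    · have hff : (fun r => ((done ++ [(rel, name, it)]).countP (pvUn r) : Int))
          = (fun r => (done.countP (pvUn r) : Int)) := by
        funext r
        rw [hcount r, if_neg h]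
      rw [hff] at htail
      simp only [pvAnnP, h]
      refine congrArg₂ List.cons ?_ htail
      simp [pvTri]
theorem pv_ofList_filter {α : Type} [BEq α] [LawfulBEq α] (q : α → Bool) :
    ∀ (l : List α), (PySem.Set.ofList l).filter q = PySem.Set.ofList (l.filter q) := by
  intro l
  induction l using List.reverseRecOn with
  | nil => rfl
  | append_singleton l x ih =>
    rw [PySem.Set.ofList_append_singleton, List.filter_append]
    by_cases hx : x ∈ l
    · rw [PySem.Set.add_of_mem (by exact (PySem.Set.mem_ofList _ _).2 hx)]
      by_cases hq : q x
      · simp only [List.filter_cons, hq, if_true, List.filter_nil]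
        rw [PySem.Set.ofList_append_singleton,
          PySem.Set.add_of_mem ((PySem.Set.mem_ofList _ _).2 (List.mem_filter.2 ⟨hx, hq⟩))]
        simpa using ih
      · simp only [List.filter_cons, hq, List.filter_nil]
        simpa using ih
    · rw [PySem.Set.add_of_not_mem (fun h => hx ((PySem.Set.mem_ofList _ _).1 h)), List.filter_append]
      by_cases hq : q x
      · simp only [List.filter_cons, hq, if_true, List.filter_nil]
        rw [PySem.Set.ofList_append_singleton,
          PySem.Set.add_of_not_mem (fun h => hx (List.mem_filter.1 ((PySem.Set.mem_ofList _ _).1 h)).1)]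
        rw [ih]
      · simp only [List.filter_cons, hq, List.filter_nil]
        simpa using ih

theorem pv_ofList_map_inj {α β : Type} [BEq α] [LawfulBEq α] [BEq β] [LawfulBEq β]
    (f : α → β) (hf : Function.Injective f) :
    ∀ (l : List α), PySem.Set.ofList (l.map f) = (PySem.Set.ofList l).map f := by
  intro l
  induction l using List.reverseRecOn with
  | nil => rfl
  | append_singleton l x ih =>
    rw [List.map_append, List.map_singleton, PySem.Set.ofList_append_singleton,
      PySem.Set.ofList_append_singleton]
    by_cases hx : x ∈ l
    · rw [PySem.Set.add_of_mem ((PySem.Set.mem_ofList _ _).2 hx),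
        PySem.Set.add_of_mem ((PySem.Set.mem_ofList _ _).2 (List.mem_map_of_mem hx)), ih]
    · rw [PySem.Set.add_of_not_mem (fun h => hx ((PySem.Set.mem_ofList _ _).1 h)),
        PySem.Set.add_of_not_mem (fun h => by
          obtain ⟨y, hy, hyx⟩ := List.mem_map.1 ((PySem.Set.mem_ofList _ _).1 h)
          exact hx (hf hyx ▸ hy)), List.map_append, ih]
      rfl

theorem pv_ofList_map_ofList {α β : Type} [BEq α] [LawfulBEq α] [BEq β] [LawfulBEq β]
    (f : α → β) :
    ∀ (l : List α), PySem.Set.ofList ((PySem.Set.ofList l).map f) = PySem.Set.ofList (l.map f) := by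
  intro l
  induction l using List.reverseRecOn with
  | nil => rfl
  | append_singleton l x ih =>
    rw [List.map_append, List.map_singleton, PySem.Set.ofList_append_singleton,
      PySem.Set.ofList_append_singleton]
    by_cases hx : x ∈ l
    · rw [PySem.Set.add_of_mem ((PySem.Set.mem_ofList _ _).2 hx), ih,
        PySem.Set.add_of_mem ((PySem.Set.mem_ofList _ _).2 (List.mem_map_of_mem hx))]
    · rw [PySem.Set.add_of_not_mem (fun h => hx ((PySem.Set.mem_ofList _ _).1 h)),
        List.map_append, List.map_singleton, PySem.Set.ofList_append_singleton, ih]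

theorem pv_A_eq_flat : ∀ (l : List (List (String × String)))
    (F : PySem.Dict (String × String) (List (List (String × String)))) (u : PySem.Dict String Int),
    (l.foldl
      (fun (st : PySem.Dict (String × String) (List (List (String × String))) × PySem.Dict String Int) it =>
        let rel := pvRel it
        let name := pvName it
        if name = "" then
          let idx := st.2.getD rel 0
          let u' := st.2.insert rel (idx + 1)
          let key := (rel, "__unnamed_" ++ PySem.Int.toStr idx)
          (st.1.modify key [] (· ++ [it]), u')
        else
          (st.1.modify (rel, name) [] (· ++ [it]), st.2))
      (F, u)).1
    = (pvAnnot u l).foldl (fun F p => F.modify p.1 [] (· ++ [p.2])) F := by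
  intro l
  induction l with
  | nil => intro F u; rfl
  | cons it rest ih =>
    intro F u
    by_cases h : pvName it = ""
    · simp only [List.foldl_cons, pvAnnot, h, if_true]
      exact ih _ _
    · simp only [List.foldl_cons, pvAnnot, h, if_false]
      exact ih _ _

-- the regrouping of the flat buckets equals B's dedup-and-filter comprehension
theorem pv_main : ∀ (ann : List ((String × String) × List (String × String))),
    ((pvFlat ann).items.foldl
      (fun b p =>
        let display := if PySem.Str.startswith p.1.2 "__unnamed_" then "" else p.1.2
        b.modify p.1.1 [] (· ++ [(display, p.2)]))
      PySem.Dict.empty).items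
    = (PySem.List.dedup ((ann.map pvTri).map (·.1))).map (fun rel =>
        (rel,
         (PySem.List.dedup (((ann.map pvTri).filter (fun q => q.1 == rel)).map (fun q => q.2.1))).map (fun key =>
           ((if PySem.Str.startswith key "__unnamed_" then "" else key),
            ((ann.map pvTri).filter (fun q => q.1 == rel && q.2.1 == key)).map (fun q => q.2.2))))) := by
  intro ann
  set G : (String × String) → List (List (String × String)) :=
    fun k => (ann.filter (fun p => p.1 == k)).map (·.2) with hG
  have hFk : (pvFlat ann).keys = PySem.Set.ofList (ann.map (·.1)) := by
    unfold pvFlat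
    rw [PySem.Dict.keys_foldl_modify_key, PySem.Dict.keys_empty, PySem.Set.update_nil_left]
  have hFn : (pvFlat ann).keys.Nodup :=
    PySem.Dict.nodup_keys_foldl_modify_key _ _ _ _ _ PySem.Dict.nodup_keys_empty
  have hFg : ∀ k, (pvFlat ann).getD k [] = G k := by
    intro k
    unfold pvFlat
    rw [PySem.Dict.getD_foldl_modify_append]
    simp [hG]
  have hFitems : (pvFlat ann).items
      = (PySem.Set.ofList (ann.map (·.1))).map (fun k => (k, G k)) := by
    rw [PySem.Dict.items_eq_map_keys _ hFn [], hFk]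
    exact List.map_congr_left (fun k _ => by rw [hFg])
  rw [hFitems]
  rw [List.foldl_map]
  have hM : ((PySem.Set.ofList (ann.map (·.1))).foldl
      (fun b k =>
        b.modify k.1 []
          (· ++ [((if PySem.Str.startswith k.2 "__unnamed_" then "" else k.2), G k)]))
      (PySem.Dict.empty : PySem.Dict String (List (String × List (List (String × String)))))).items
      = (((PySem.Set.ofList (ann.map (·.1))).map
          (fun k => (k.1, ((if PySem.Str.startswith k.2 "__unnamed_" then "" else k.2), G k)))).foldl
          (fun b q => b.modify q.1 [] (· ++ [q.2])) PySem.Dict.empty).items := by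
    rw [List.foldl_map]
  rw [hM]
  set M : List (String × (String × List (List (String × String)))) :=
    (PySem.Set.ofList (ann.map (·.1))).map
      (fun k => (k.1, ((if PySem.Str.startswith k.2 "__unnamed_" then "" else k.2), G k))) with hMdef
  have hLk : ((M.foldl (fun b q => b.modify q.1 [] (· ++ [q.2])) PySem.Dict.empty)).keys
      = PySem.Set.ofList (M.map (·.1)) := by
    rw [PySem.Dict.keys_foldl_modify_key, PySem.Dict.keys_empty, PySem.Set.update_nil_left]
  have hLn : ((M.foldl (fun b q => b.modify q.1 [] (· ++ [q.2])) PySem.Dict.empty)).keys.Nodup :=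
    PySem.Dict.nodup_keys_foldl_modify_key _ _ _ _ _ PySem.Dict.nodup_keys_empty
  have hLg : ∀ r, ((M.foldl (fun b q => b.modify q.1 [] (· ++ [q.2])) PySem.Dict.empty)).getD r []
      = (M.filter (fun q => q.1 == r)).map (·.2) := by
    intro r
    rw [PySem.Dict.getD_foldl_modify_append]
    simp
  have hkeys : PySem.Set.ofList (M.map (·.1)) = PySem.Set.ofList (ann.map (·.1.1)) := by
    rw [hMdef, List.map_map]
    have : ((fun q => q.1) ∘ fun k =>
        ((k.1 : String), ((if PySem.Str.startswith k.2 "__unnamed_" then "" else k.2), G k)))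
        = fun k => k.1 := rfl
    rw [this, pv_ofList_map_ofList, List.map_map]
    rfl
  -- B's side: unfold the triple view
  have hT1 : (ann.map pvTri).map (fun q => q.1) = ann.map (·.1.1) := by
    rw [List.map_map]; rfl
  have hT2 : ∀ r, (ann.map pvTri).filter (fun q => q.1 == r)
      = (ann.filter (fun p => p.1.1 == r)).map pvTri := by
    intro r
    rw [List.filter_map]; rfl
  rw [hT1]
  simp only [PySem.List.dedup_eq_ofList]
  rw [PySem.Dict.items_eq_map_keys _ hLn [], hLk, hkeys]
  apply List.map_congr_left
  intro r _
  rw [hLg r]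
  refine congrArg (Prod.mk r) ?_
  rw [hT2 r]
  set annr := ann.filter (fun p => p.1.1 == r) with hannr
  have hT3 : (annr.map pvTri).map (fun q => q.2.1) = annr.map (·.1.2) := by
    rw [List.map_map]; rfl
  rw [hT3]
  -- LHS: filter M down to relation r
  rw [hMdef, List.filter_map, List.map_map]
  have hcomp : ((fun (q : String × (String × List (List (String × String)))) => q.1 == r) ∘
      (fun k => ((k.1 : String), ((if PySem.Str.startswith k.2 "__unnamed_" then "" else k.2), G k))))
      = fun (k : String × String) => k.1 == r := rfl
  rw [hcomp, pv_ofList_filter, List.filter_map]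
  have hcomp2 : ((fun (k : String × String) => k.1 == r) ∘ (fun (x : (String × String) × List (String × String)) => x.1))
      = fun p => p.1.1 == r := rfl
  rw [hcomp2, ← hannr]
  have hmap1 : annr.map (fun (x : (String × String) × List (String × String)) => x.1)
      = (annr.map (·.1.2)).map (fun k2 => (r, k2)) := by
    rw [List.map_map]
    apply List.map_congr_left
    intro p hp
    have h1 : p.1.1 = r := by
      have := (List.mem_filter.1 (hannr ▸ hp)).2
      simpa using this
    show p.1 = (r, p.1.2)
    rw [← h1]
  rw [hmap1, pv_ofList_map_inj _ (fun a b h => (Prod.ext_iff.1 h).2), List.map_map]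
  apply List.map_congr_left
  intro k2 _
  show ((if PySem.Str.startswith k2 "__unnamed_" then "" else k2), G (r, k2))
    = ((if PySem.Str.startswith k2 "__unnamed_" then "" else k2),
       ((ann.map pvTri).filter (fun q => q.1 == r && q.2.1 == k2)).map (fun q => q.2.2))
  refine congrArg _ ?_
  have hT4 : (ann.map pvTri).filter (fun q => q.1 == r && q.2.1 == k2)
      = (ann.filter (fun p => p.1.1 == r && p.1.2 == k2)).map pvTri := by
    rw [List.filter_map]; rfl
  rw [hT4, List.map_map]
  show (ann.filter (fun p => p.1 == (r, k2))).map (·.2)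
    = (ann.filter (fun p => p.1.1 == r && p.1.2 == k2)).map ((fun q => q.2.2) ∘ pvTri)
  have hfun : ((fun (q : String × String × List (String × String)) => q.2.2) ∘ pvTri)
      = fun (p : (String × String) × List (String × String)) => p.2 := rfl
  rw [hfun]
  apply congrArg
  apply List.filter_congr
  intro a _
  obtain ⟨⟨x, y⟩, z⟩ := a
  show ((x, y) == (r, k2)) = _
  rw [Bool.eq_iff_iff]; simp [Prod.ext_iff]

-- ===== VERDICT (by name: the statement is the Claim_ definition above) =====
theorem group_by_relation_py_spec : Claim_equal_group_by_relation_py := by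
  intro items _
  show group_by_relation_py items = group_by_relation_py_alt items
  have h1 : group_by_relation_py items
      = ((pvFlat (pvAnnot PySem.Dict.empty items)).items.foldl
          (fun b p =>
            let display := if PySem.Str.startswith p.1.2 "__unnamed_" then "" else p.1.2
            b.modify p.1.1 [] (· ++ [(display, p.2)]))
          PySem.Dict.empty).items :=
    congrArg (fun F => (F.items.foldl
      (fun b p =>
        let display := if PySem.Str.startswith p.1.2 "__unnamed_" then "" else p.1.2
        b.modify p.1.1 [] (· ++ [(display, p.2)]))
      PySem.Dict.empty).items) (pv_A_eq_flat items PySem.Dict.empty PySem.Dict.empty)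
  -- B's annotated list equals A's annotation stream (through the triple view)
  have hann : ((PySem.List.enumerate (items.map (fun it => (pvRel it, pvName it, it))) 0).map (fun p =>
      (p.2.1,
       (if p.2.2.1 = "" then
          "__unnamed_" ++ PySem.Int.toStr
            ((((PySem.List.slice (items.map (fun it => (pvRel it, pvName it, it))) none (some p.1)).countP
                (fun q => q.1 == p.2.1 && q.2.1 == "")) : Nat) : Int)
        else p.2.2.1),
       p.2.2.2)))
      = (pvAnnot PySem.Dict.empty items).map pvTri := by
    have h := pv_enum_eq_annP (items.map (fun it => (pvRel it, pvName it, it))) []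
    simp only [List.length_nil, Nat.cast_zero, List.nil_append] at h
    have hfun : (fun r => ((List.countP (pvUn r) ([] : List (String × String × List (String × String))) : Nat) : Int))
        = (fun r => (PySem.Dict.empty : PySem.Dict String Int).getD r 0) := by
      funext r
      simp [PySem.Dict.getD_empty]
    rw [h, hfun, pv_annot_eq_annP]
  show group_by_relation_py items
      = (PySem.List.dedup ((((PySem.List.enumerate (items.map (fun it => (pvRel it, pvName it, it))) 0).map (fun p =>
          (p.2.1,
           (if p.2.2.1 = "" then
              "__unnamed_" ++ PySem.Int.toStr
                ((((PySem.List.slice (items.map (fun it => (pvRel it, pvName it, it))) none (some p.1)).countP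
                    (fun q => q.1 == p.2.1 && q.2.1 == "")) : Nat) : Int)
            else p.2.2.1),
           p.2.2.2)))).map (·.1))).map (fun rel =>
        (rel,
         (PySem.List.dedup ((((PySem.List.enumerate (items.map (fun it => (pvRel it, pvName it, it))) 0).map (fun p =>
            (p.2.1,
             (if p.2.2.1 = "" then
                "__unnamed_" ++ PySem.Int.toStr
                  ((((PySem.List.slice (items.map (fun it => (pvRel it, pvName it, it))) none (some p.1)).countP
                      (fun q => q.1 == p.2.1 && q.2.1 == "")) : Nat) : Int)
              else p.2.2.1),
             p.2.2.2))).filter (fun q => q.1 == rel)).map (fun q => q.2.1))).map (fun key =>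
           ((if PySem.Str.startswith key "__unnamed_" then "" else key),
            (((PySem.List.enumerate (items.map (fun it => (pvRel it, pvName it, it))) 0).map (fun p =>
              (p.2.1,
               (if p.2.2.1 = "" then
                  "__unnamed_" ++ PySem.Int.toStr
                    ((((PySem.List.slice (items.map (fun it => (pvRel it, pvName it, it))) none (some p.1)).countP
                        (fun q => q.1 == p.2.1 && q.2.1 == "")) : Nat) : Int)
                else p.2.2.1),
               p.2.2.2))).filter (fun q => q.1 == rel && q.2.1 == key)).map (fun q => q.2.2)))))
  rw [hann, h1]
  exact pv_main (pvAnnot PySem.Dict.empty items)
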